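-- pv_equiv track=rewrite | github.com/Jeric1223/Study-Algorithms | 프로그래머스 python/모의고사.py | solution
-- ===== SOURCE A (Python) =====
-- def solution(answers):
--     # 수포자 1 번 12345
--     # 수포자 2 번 21232425
--     # 수포자 3 번 3311224455
--     frist_person = [1, 2, 3, 4, 5]
--     second_person = [2, 1, 2, 3, 2, 4, 2, 5]
--     third_person = [3, 3, 1, 1, 2, 2, 4, 4, 5, 5]
--     score_arr = [0, 0, 0]
--     max = 0
--     answer = []
--
--     for index, item in enumerate(answers):
--         if item == frist_person[index % 5]:
--             score_arr[0] += 1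
--         if item == second_person[index % 8]:
--             score_arr[1] += 1
--         if item == third_person[index % 10]:
--             score_arr[2] += 1
--
--     for item in score_arr:
--         if (max < item):
--             max = item
--
--     for i, item in enumerate(score_arr):
--         if (max == item):
--             answer.append(i + 1)
--
--     return answer
-- ===== SOURCE B (Python) =====
-- def solution(answers):
--     # One counting pass: tally (index % 40, value) pairs (40 = lcm of the three
--     # pattern periods), then read each guesser's score off the 40-entry table.
--     cnt = {}
--     for i, a in enumerate(answers):
--         k = (i % 40, a)
--         cnt[k] = cnt.get(k, 0) + 1
--     patterns = [[1, 2, 3, 4, 5],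
--                 [2, 1, 2, 3, 2, 4, 2, 5],
--                 [3, 3, 1, 1, 2, 2, 4, 4, 5, 5]]
--     scores = [sum(cnt.get((r, p[r % len(p)]), 0) for r in range(40))
--               for p in patterns]
--     best = max(scores)
--     return [g + 1 for g in range(3) if scores[g] == best]
-- ===== Notes on version B (the rewrite author's own statement) =====
-- stated objective: alternative
-- what changed: Replaces A's per-element comparison against the three cyclic patterns (three if-checks per answer plus a hand-rolled max loop) by a single tallying pass that builds a dict counting (index % 40, value) pairs (40 = lcm of the pattern periods) and then reads each guesser's score off 40 table lookups, with builtin max and a comprehension for the winners.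
import Mathlib
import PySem

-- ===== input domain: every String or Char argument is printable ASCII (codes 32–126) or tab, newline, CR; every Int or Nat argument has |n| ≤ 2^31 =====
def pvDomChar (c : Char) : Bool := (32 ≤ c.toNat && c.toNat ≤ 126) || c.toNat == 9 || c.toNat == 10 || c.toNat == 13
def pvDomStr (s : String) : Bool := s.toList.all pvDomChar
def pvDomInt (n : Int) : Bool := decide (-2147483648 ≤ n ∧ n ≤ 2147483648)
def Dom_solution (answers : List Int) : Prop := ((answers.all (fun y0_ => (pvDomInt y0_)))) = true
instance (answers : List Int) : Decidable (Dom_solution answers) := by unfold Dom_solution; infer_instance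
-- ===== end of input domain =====

-- B replaces A's per-element pattern comparisons by one tallying pass over (index % 40, value)
-- pairs (40 = lcm of the pattern periods) followed by 40 table lookups per guesser (objective: alternative).

-- ===== PORT A =====
-- the loop body of A's first for: three if-updates on the triple (score_arr[0], score_arr[1], score_arr[2])
def stepA (s : Int × Int × Int) (ia : Int × Int) : Int × Int × Int :=
  let t1 := if ia.2 = PySem.List.pyGetD [1, 2, 3, 4, 5] (PySem.Int.mod ia.1 5) 0 then
      (s.1 + 1, s.2.1, s.2.2) else s
  let t2 := if ia.2 = PySem.List.pyGetD [2, 1, 2, 3, 2, 4, 2, 5] (PySem.Int.mod ia.1 8) 0 then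
      (t1.1, t1.2.1 + 1, t1.2.2) else t1
  if ia.2 = PySem.List.pyGetD [3, 3, 1, 1, 2, 2, 4, 4, 5, 5] (PySem.Int.mod ia.1 10) 0 then
      (t2.1, t2.2.1, t2.2.2 + 1) else t2

def solution (answers : List Int) : List Int :=
  let s := (PySem.List.enumerate answers).foldl stepA (0, 0, 0)
  let scoreArr : List Int := [s.1, s.2.1, s.2.2]
  let mx := scoreArr.foldl (fun m item => if m < item then item else m) 0
  (PySem.List.enumerate scoreArr).foldl
    (fun ans it => if mx = it.2 then ans ++ [it.1 + 1] else ans) []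

-- ===== PORT B =====
def solution_alt (answers : List Int) : List Int :=
  -- cnt[k] = cnt.get(k, 0) + 1 over k = (i % 40, a)
  let cnt : PySem.Dict (Int × Int) Int := (PySem.List.enumerate answers).foldl
    (fun d ia => d.insert (PySem.Int.mod ia.1 40, ia.2)
                   (d.getD (PySem.Int.mod ia.1 40, ia.2) 0 + 1))
    PySem.Dict.empty
  let patterns : List (List Int) :=
    [[1, 2, 3, 4, 5], [2, 1, 2, 3, 2, 4, 2, 5], [3, 3, 1, 1, 2, 2, 4, 4, 5, 5]]
  let scores := patterns.map (fun p =>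
    ((PySem.List.pyRange 0 40 1).map (fun r =>
      cnt.getD (r, PySem.List.pyGetD p (PySem.Int.mod r (PySem.List.len p)) 0) 0)).sum)
  -- max(scores); scores always has three elements, so max? is some
  let best := (PySem.List.max? scores (fun x => x)).getD 0
  (PySem.List.pyRange 0 3 1).filterMap (fun g =>
    if PySem.List.pyGetD scores g 0 = best then some (g + 1) else none)

-- ===== PRECONDITION & SPEC =====
def Spec_solution (answers : List Int) (out : List Int) : Prop := out = solution_alt answers
instance (answers : List Int) (out : List Int) : Decidable (Spec_solution answers out) := by unfold Spec_solution; infer_instance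

-- ===== CLAIM =====
def Claim_equal_solution : Prop := ∀ (answers : List Int), Dom_solution answers → Spec_solution answers (solution answers)

-- ===== LEMMAS AND PROOFS =====

-- score of pattern p counted from enumeration offset s (A's per-element indicator sum)
def gscore (p : List Int) (answers : List Int) (s : Int) : Int :=
  ((PySem.List.enumerate answers s).map
    (fun ia => if ia.2 = PySem.List.pyGetD p (PySem.Int.mod ia.1 (PySem.List.len p)) 0
               then (1 : Int) else 0)).sum

lemma foldA_eq (answers : List Int) : ∀ (s a b c : Int),
    (PySem.List.enumerate answers s).foldl stepA (a, b, c) =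
      (a + gscore [1, 2, 3, 4, 5] answers s,
       b + gscore [2, 1, 2, 3, 2, 4, 2, 5] answers s,
       c + gscore [3, 3, 1, 1, 2, 2, 4, 4, 5, 5] answers s) := by
  induction answers with
  | nil => intro s a b c; simp [gscore, PySem.List.enumerate_nil]
  | cons x xs ih =>
    intro s a b c
    simp only [PySem.List.enumerate_cons, List.foldl_cons, gscore, List.map_cons, List.sum_cons,
      stepA]
    have h5 : PySem.List.len [(1:Int), 2, 3, 4, 5] = 5 := rfl
    have h8 : PySem.List.len [(2:Int), 1, 2, 3, 2, 4, 2, 5] = 8 := rfl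
    have h10 : PySem.List.len [(3:Int), 3, 1, 1, 2, 2, 4, 4, 5, 5] = 10 := rfl
    rw [h5, h8, h10]
    split_ifs <;> rw [ih] <;> simp only [gscore] <;> refine Prod.ext ?_ (Prod.ext ?_ ?_) <;>
      simp <;> ring

lemma gscore_nonneg (p answers : List Int) (s : Int) : 0 ≤ gscore p answers s := by
  induction answers generalizing s with
  | nil => simp [gscore, PySem.List.enumerate_nil]
  | cons x xs ih =>
    simp only [gscore, PySem.List.enumerate_cons, List.map_cons, List.sum_cons]
    have := ih (s + 1)
    simp only [gscore] at this
    split_ifs <;> omega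

-- a 0/1 indicator summed over a duplicate-free list that contains m picks out the single hit
lemma sum_ind (f : Int → Int) (m v : Int) : ∀ (R : List Int), R.Nodup → m ∈ R →
    (R.map (fun r => if ((m, v) : Int × Int) = (r, f r) then (1 : Int) else 0)).sum =
      if v = f m then 1 else 0 := by
  intro R
  induction R with
  | nil => intro _ h; cases h
  | cons r R ih =>
    intro hnd hm
    simp only [List.map_cons, List.sum_cons]
    rcases List.mem_cons.mp hm with h | h
    · subst h
      have hnotin : m ∉ R := (List.nodup_cons.mp hnd).1
      have hz : (R.map (fun r => if ((m, v) : Int × Int) = (r, f r) then (1 : Int) else 0)).sum = 0 := by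
        apply List.sum_eq_zero
        intro x hx
        rcases List.mem_map.mp hx with ⟨r', hr', hval⟩
        have : ((m, v) : Int × Int) ≠ (r', f r') := by
          intro he
          exact hnotin (by cases he; exact hr')
        simpa [this] using hval.symm
      rw [hz]
      by_cases hv : v = f m <;> simp [hv, Prod.ext_iff]
    · have hne : m ≠ r := by
        rintro rfl; exact (List.nodup_cons.mp hnd).1 h
      rw [ih (List.nodup_cons.mp hnd).2 h]
      simp [Prod.ext_iff, hne]

-- B's table read for one pattern equals the per-element indicator sum
lemma scoreB_eq (p : List Int) (hpos : 0 < PySem.List.len p) (hdvd : PySem.List.len p ∣ 40)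
    (answers : List Int) : ∀ (s : Int),
    ((PySem.List.pyRange 0 40 1).map (fun r =>
      (((PySem.List.enumerate answers s).map (fun ia => (PySem.Int.mod ia.1 40, ia.2))).count
        (r, PySem.List.pyGetD p (PySem.Int.mod r (PySem.List.len p)) 0) : Int))).sum =
      gscore p answers s := by
  induction answers with
  | nil =>
    intro s
    simp [gscore, PySem.List.enumerate_nil]
  | cons x xs ih =>
    intro s
    simp only [gscore, PySem.List.enumerate_cons, List.map_cons, List.sum_cons]
    simp only [List.count_cons, beq_iff_eq]
    have hsplit :
        ((PySem.List.pyRange 0 40 1).map (fun r =>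
          ((((PySem.List.enumerate xs (s+1)).map (fun ia => (PySem.Int.mod ia.1 40, ia.2))).count
            (r, PySem.List.pyGetD p (PySem.Int.mod r (PySem.List.len p)) 0)
            + if ((PySem.Int.mod s 40, x) : Int × Int)
                = (r, PySem.List.pyGetD p (PySem.Int.mod r (PySem.List.len p)) 0) then 1 else 0 : Nat) : Int))).sum
        = ((PySem.List.pyRange 0 40 1).map (fun r =>
            (((PySem.List.enumerate xs (s+1)).map (fun ia => (PySem.Int.mod ia.1 40, ia.2))).count
              (r, PySem.List.pyGetD p (PySem.Int.mod r (PySem.List.len p)) 0) : Int))).sum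
          + ((PySem.List.pyRange 0 40 1).map (fun r =>
              if ((PySem.Int.mod s 40, x) : Int × Int)
                = (r, PySem.List.pyGetD p (PySem.Int.mod r (PySem.List.len p)) 0) then (1:Int) else 0)).sum := by
      induction (PySem.List.pyRange 0 40 1) with
      | nil => simp
      | cons r R ihR =>
        simp only [List.map_cons, List.sum_cons, ihR]
        push_cast
        by_cases hc : ((PySem.Int.mod s 40, x) : Int × Int)
            = (r, PySem.List.pyGetD p (PySem.Int.mod r (PySem.List.len p)) 0) <;>
          simp only [hc, if_true, if_false] <;> ring
    rw [hsplit, ih (s+1)]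
    have hmem : PySem.Int.mod s 40 ∈ PySem.List.pyRange 0 40 1 := by
      rw [PySem.List.mem_pyRange_one]
      exact ⟨PySem.Int.mod_nonneg s (by norm_num), PySem.Int.mod_lt s (by norm_num)⟩
    rw [sum_ind (fun r => PySem.List.pyGetD p (PySem.Int.mod r (PySem.List.len p)) 0)
      (PySem.Int.mod s 40) x _ (PySem.List.nodup_pyRange_one 0 40) hmem]
    have hmm : PySem.Int.mod (PySem.Int.mod s 40) (PySem.List.len p) = PySem.Int.mod s (PySem.List.len p) := by
      rw [PySem.Int.mod_eq_emod_of_pos hpos, PySem.Int.mod_eq_emod_of_pos hpos,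
        PySem.Int.mod_eq_emod_of_pos (by norm_num : (0:Int) < 40)]
      exact Int.emod_emod_of_dvd s hdvd
    rw [hmm]
    simp only [gscore]
    ring

-- final selection: A's hand-rolled max + append loop vs B's max? + filterMap, on three scores
lemma max3 (a b c : Int) : (PySem.List.max? [a, b, c] (fun x => x)).getD 0 = max a (max b c) := by
  by_cases hab : a < b <;> by_cases h1 : b < c <;> by_cases h2 : a < c <;>
    simp [PySem.List.max?, hab, h1, h2] <;> omega

lemma tail_eq (a b c : Int) (ha : 0 ≤ a) (hb : 0 ≤ b) (_hc : 0 ≤ c) :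
    (PySem.List.enumerate [a, b, c]).foldl
        (fun ans it =>
          if [a, b, c].foldl (fun m item => if m < item then item else m) 0 = it.2
          then ans ++ [it.1 + 1] else ans) ([] : List Int) =
      (PySem.List.pyRange 0 3 1).filterMap (fun g =>
        if PySem.List.pyGetD [a, b, c] g 0 = (PySem.List.max? [a, b, c] (fun x => x)).getD 0
        then some (g + 1) else none) := by
  have hR : PySem.List.pyRange 0 3 1 = [0, 1, 2] := by decide
  have hmx : ([a, b, c].foldl (fun m item => if m < item then item else m) 0)
      = max a (max b c) := by
    simp only [List.foldl_cons, List.foldl_nil]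
    have h1 := le_max_left a (max b c)
    have h2 := le_trans (le_max_left b c) (le_max_right a (max b c))
    have h3 := le_trans (le_max_right b c) (le_max_right a (max b c))
    rcases max_choice a (max b c) with h | h
    · rw [h]; split_ifs <;> omega
    · rcases max_choice b c with h' | h' <;> rw [h, h'] <;> split_ifs <;> omega
  rw [hR, max3, hmx]
  have g0 : PySem.List.pyGetD [a, b, c] (0 : Int) 0 = a := rfl
  have g1 : PySem.List.pyGetD [a, b, c] (1 : Int) 0 = b := rfl
  have g2 : PySem.List.pyGetD [a, b, c] (2 : Int) 0 = c := rfl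
  simp only [PySem.List.enumerate_cons, PySem.List.enumerate_nil, List.foldl_cons,
    List.foldl_nil, List.filterMap_cons, List.filterMap_nil, g0, g1, g2]
  have h1 := le_max_left a (max b c)
  have h2 := le_trans (le_max_left b c) (le_max_right a (max b c))
  have h3 := le_trans (le_max_right b c) (le_max_right a (max b c))
  have hch : max a (max b c) = a ∨ max a (max b c) = b ∨ max a (max b c) = c := by
    rcases max_choice a (max b c) with h | h
    · exact Or.inl h
    · rcases max_choice b c with h' | h'
      · exact Or.inr (Or.inl (h.trans h'))
      · exact Or.inr (Or.inr (h.trans h'))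
  rcases hch with h | h | h <;> rw [h] at h1 h2 h3 ⊢ <;>
    split_ifs <;> first | rfl | omega

-- the counting loop of B: the table holds the count of each key among the (i % 40, a) pairs
lemma cnt_eq (key : Int × Int → Int × Int) : ∀ (E : List (Int × Int)) (d : PySem.Dict (Int × Int) Int) (k : Int × Int),
    (E.foldl (fun d ia => d.insert (key ia) (d.getD (key ia) 0 + 1)) d).getD k 0 =
      d.getD k 0 + ((E.map key).count k : Int) := by
  intro E
  induction E with
  | nil => intro d k; simp
  | cons e E ih =>
    intro d k
    simp only [List.foldl_cons, List.map_cons, List.count_cons, beq_iff_eq]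
    rw [ih]
    rw [PySem.Dict.getD_insert]
    by_cases hk : k = key e
    · simp [hk]; ring
    · simp [hk]; exact fun h => hk h.symm

-- ===== VERDICT (by name: the statement is the Claim_ definition above) =====
theorem solution_spec : Claim_equal_solution := by
  intro answers _
  show solution answers = solution_alt answers
  unfold solution solution_alt
  simp only [foldA_eq, zero_add]
  -- rewrite B's counter lookups into counts of the key list
  have hcnt : ∀ (k : Int × Int),
      ((PySem.List.enumerate answers).foldl
        (fun d ia => d.insert (PySem.Int.mod ia.1 40, ia.2)
          (d.getD (PySem.Int.mod ia.1 40, ia.2) 0 + 1)) PySem.Dict.empty).getD k 0 =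
      (((PySem.List.enumerate answers).map (fun ia => (PySem.Int.mod ia.1 40, ia.2))).count k : Int) := by
    intro k
    rw [cnt_eq (fun ia => (PySem.Int.mod ia.1 40, ia.2)) (PySem.List.enumerate answers) PySem.Dict.empty k]
    simp
  simp only [List.map_cons, List.map_nil]
  simp only [hcnt]
  rw [scoreB_eq [1,2,3,4,5] (by decide) (by decide) answers 0,
    scoreB_eq [2,1,2,3,2,4,2,5] (by decide) (by decide) answers 0,
    scoreB_eq [3,3,1,1,2,2,4,4,5,5] (by decide) (by decide) answers 0]
  exact tail_eq _ _ _ (gscore_nonneg _ _ _) (gscore_nonneg _ _ _) (gscore_nonneg _ _ _)
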